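-- pv_equiv track=rewrite | github.com/DecimalToBinary/algorithm | 프로그래머스/unrated/181887. 홀수 vs 짝수/홀수 vs 짝수.py | solution
-- ===== SOURCE A (Python) =====
-- def solution(num_list):
--     oddSum=0
--     evenSum=0
--     for i in list(enumerate(num_list,start=1)):
--         if i[0]%2==1:
--             oddSum+=i[1]
--         else:
--             evenSum+=i[1]
--     return oddSum if oddSum>=evenSum else evenSum
-- ===== SOURCE B (Python) =====
-- def solution(num_list):
--     oddSum = sum(num_list[::2])
--     evenSum = sum(num_list[1::2])
--     return max(oddSum, evenSum)
-- ===== Notes on version B (the rewrite author's own statement) =====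
-- stated objective: idiomatic
-- what changed: Replaces the enumerate loop with a parity branch and conditional accumulators by two independent stride-2 slice sums combined with max; the C-level slicing and sum give a constant-factor speedup over the interpreted per-element loop.
import Mathlib
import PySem

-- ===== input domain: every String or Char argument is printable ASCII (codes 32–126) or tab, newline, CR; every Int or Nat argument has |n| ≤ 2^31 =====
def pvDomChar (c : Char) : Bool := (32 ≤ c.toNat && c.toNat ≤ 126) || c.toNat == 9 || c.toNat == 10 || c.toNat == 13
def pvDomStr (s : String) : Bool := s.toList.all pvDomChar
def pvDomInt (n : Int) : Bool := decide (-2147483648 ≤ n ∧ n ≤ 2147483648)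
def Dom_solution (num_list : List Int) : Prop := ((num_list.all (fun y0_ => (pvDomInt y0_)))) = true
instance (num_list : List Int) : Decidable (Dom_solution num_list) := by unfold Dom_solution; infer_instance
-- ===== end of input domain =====

-- B replaces A's enumerate loop with a parity branch by two stride-2 slice sums combined with max (idiomatic decomposition).


-- ===== PORT A =====
def solution (num_list : List Int) : Int :=
  let oddSum : Int := 0
  let evenSum : Int := 0
  let p := (PySem.List.enumerate num_list 1).foldl
    (fun (acc : Int × Int) i =>
      if PySem.Int.mod i.1 2 = 1 then (acc.1 + i.2, acc.2) else (acc.1, acc.2 + i.2))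
    (oddSum, evenSum)
  if p.1 ≥ p.2 then p.1 else p.2

-- ===== PORT B =====
-- num_list[::2] / num_list[1::2]; slice? is none only for step 0, so getD [] is a pure totality guard
def solution_alt (num_list : List Int) : Int :=
  let oddSum := ((PySem.List.slice? num_list none none 2).getD []).sum
  let evenSum := ((PySem.List.slice? num_list (some 1) none 2).getD []).sum
  max oddSum evenSum

-- ===== PRECONDITION & SPEC =====
def Spec_solution (num_list : List Int) (out : Int) : Prop := out = solution_alt num_list
instance (num_list : List Int) (out : Int) : Decidable (Spec_solution num_list out) := by unfold Spec_solution; infer_instance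

-- ===== CLAIM (what is proved, stated in full; the proofs are below) =====
def Claim_equal_solution : Prop := ∀ (num_list : List Int), Dom_solution num_list → Spec_solution num_list (solution num_list)

-- ===== LEMMAS AND PROOFS =====

-- every other element of a list, starting with the first
def eo {α : Type} : List α → List α
  | [] => []
  | [x] => [x]
  | x :: _ :: r => x :: eo r

theorem eo_cons {α : Type} (a : α) (l : List α) : eo (a :: l) = a :: eo l.tail := by
  cases l <;> simp [eo]

theorem eo_filterMap {α : Type} (xs : List α) :
    (List.range ((xs.length + 1) / 2)).filterMap (fun k => xs[2 * k]?) = eo xs := by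
  induction xs using eo.induct with
  | case1 => simp [eo]
  | case2 x => simp [eo]
  | case3 x y r ih =>
      have hlen : ((x :: y :: r).length + 1) / 2 = (r.length + 1) / 2 + 1 := by
        simp [List.length_cons]; omega
      rw [hlen, List.range_succ_eq_map, List.filterMap_cons, List.filterMap_map]
      have hf : ((fun k => (x :: y :: r)[2 * k]?) ∘ Nat.succ) = (fun k : ℕ => r[2 * k]?) := by
        funext k
        have h2 : 2 * Nat.succ k = (2 * k + 1) + 1 := by omega
        simp only [Function.comp, h2, List.getElem?_cons_succ]
      rw [hf, ih]
      simp [eo]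

theorem slice2_none (xs : List Int) :
    PySem.List.slice? xs none none 2 = some (eo xs) := by
  rw [← eo_filterMap]
  simp only [PySem.List.slice?, PySem.List.sliceIndices]
  norm_num
  have hc : (if 0 < xs.length then (((xs.length : Int) + 2 - 1) / 2).toNat else 0)
      = (xs.length + 1) / 2 := by split_ifs with h <;> omega
  rw [hc]
  have hf : (fun x : ℕ => xs[((2 : Int) * ↑x).toNat]?) = fun k : ℕ => xs[2 * k]? := by
    funext k
    have h : ((2 : Int) * (k : Int)).toNat = 2 * k := by omega
    rw [h]
  rw [hf]

theorem slice2_one (xs : List Int) :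
    PySem.List.slice? xs (some 1) none 2 = some (eo xs.tail) := by
  cases xs with
  | nil => rfl
  | cons x t =>
    have ht : eo (x :: t).tail = eo t := rfl
    rw [ht, ← eo_filterMap t]
    simp only [PySem.List.slice?, PySem.List.sliceIndices]
    norm_num
    have hc : (if 0 < t.length then (((t.length : Int) + 2 - 1) / 2).toNat else 0)
        = (t.length + 1) / 2 := by split_ifs with h <;> omega
    rw [hc]
    have hf : (fun k : ℕ => (x :: t)[((1 : Int) + 2 * ↑k).toNat]?) = fun k : ℕ => t[2 * k]? := by
      funext k
      have h : ((1 : Int) + 2 * (k : Int)).toNat = 2 * k + 1 := by omega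
      rw [h, List.getElem?_cons_succ]
    rw [hf]

theorem modTwo (s : Int) : PySem.Int.mod s 2 = s % 2 := by
  simp [PySem.Int.mod, Int.fmod_eq_emod]

theorem fold_eo (xs : List Int) (o e s : Int) (hs : s % 2 = 1) :
    (PySem.List.enumerate xs s).foldl
      (fun (acc : Int × Int) i =>
        if PySem.Int.mod i.1 2 = 1 then (acc.1 + i.2, acc.2) else (acc.1, acc.2 + i.2))
      (o, e) = (o + (eo xs).sum, e + (eo xs.tail).sum) := by
  induction xs using eo.induct generalizing o e s with
  | case1 => simp [PySem.List.enumerate_nil, eo]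
  | case2 x =>
      simp [PySem.List.enumerate_cons, PySem.List.enumerate_nil, eo, hs]
  | case3 x y r ih =>
      have h1 : (s + 1) % 2 ≠ 1 := by omega
      have h2 : (s + 1 + 1) % 2 = 1 := by omega
      simp only [PySem.List.enumerate_cons, List.foldl_cons, modTwo, hs, h1, if_true,
        if_false]
      simp only [← modTwo]
      rw [ih (o + x) (e + y) (s + 1 + 1) h2]
      simp only [eo_cons, List.tail_cons, List.sum_cons, Prod.mk.injEq]
      constructor <;> ring

-- ===== VERDICT (by name: the statement is the Claim_ definition above) =====
theorem solution_spec : Claim_equal_solution := by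
  intro xs _
  unfold Spec_solution solution solution_alt
  rw [slice2_none, slice2_one]
  simp only [Option.getD_some]
  rw [fold_eo xs 0 0 1 (by decide)]
  simp only [zero_add]
  rcases le_or_gt (eo xs.tail).sum (eo xs).sum with h | h
  · rw [if_pos h, max_eq_left h]
  · rw [if_neg (by omega), max_eq_right (le_of_lt h)]
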